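-- pv_equiv track=rewrite | github.com/readerbench/ReaderBench | rb/similarity/StringKernels.py | compute_kernel_two_strings_clusters
-- ===== SOURCE A (Python) =====
-- def compute_kernel_two_strings_clusters(string1, string2, ngram_range_min, ngram_range_max, clusters):
--
--     ngrams = {}
--     ngrams_in_clusters = {}
--
--     for char_index, char in enumerate(string1):
--         for d in range(ngram_range_min, ngram_range_max + 1):
--             if char_index + d <= len(string1):
--                 ngram = string1[char_index:char_index + d]
--                 if ngram not in ngrams_in_clusters:
--                     found = False
--                     for cluster in clusters:
--                         if ngram in cluster:
--                             found = True
--                             break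
--                     ngrams_in_clusters[ngram] = found
--                 if ngrams_in_clusters[ngram] == False:
--                     if ngram not in ngrams:
--                         ngrams[ngram] = 1
--                     else:
--                         ngrams[ngram] = ngrams[ngram] + 1
--
--     kernel = 0
--     for char_index, char in enumerate(string2):
--         for d in range(ngram_range_min, ngram_range_max + 1):
--             if char_index + d <= len(string2):
--                 ngram = string2[char_index:char_index + d]
--                 if (ngram in ngrams):
--                     kernel += 1
--                     ngrams.pop(ngram)
--
--     d1 = {}
--     d2 = {}
--
--     for cl, _ in enumerate(clusters):
--         d1[cl] = 0
--         d2[cl] = 0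
--
--     for cl_index, cl in enumerate(clusters):
--         for ngram in cl:
--             if len(ngram) >= ngram_range_min and len(ngram) <= ngram_range_max:
--                 d1[cl_index] = d1[cl_index] + string1.count(ngram)
--                 d2[cl_index] = d2[cl_index] + string2.count(ngram)
--
--     for cl, _ in enumerate(clusters):
--         if d1[cl] * d2[cl] == 0:
--             continue
--         kernel += 1
--     return kernel
-- ===== SOURCE B (Python) =====
-- def compute_kernel_two_strings_clusters(string1, string2, ngram_range_min, ngram_range_max, clusters):
--     # Union of all cluster n-grams.
--     cluster_union = set()
--     for cl in clusters:
--         cluster_union.update(cl)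
--
--     def grams(s):
--         return {s[i:i + d] for i in range(len(s))
--                 for d in range(ngram_range_min, ngram_range_max + 1)
--                 if i + d <= len(s)}
--
--     # Sort both distinct-gram collections, then count the shared ones with a
--     # two-pointer merge over the two sorted lists (no hashing/popping machinery).
--     xs = sorted(g for g in grams(string1) if g not in cluster_union)
--     ys = sorted(grams(string2))
--     kernel = 0
--     i = j = 0
--     while i < len(xs) and j < len(ys):
--         if xs[i] < ys[j]:
--             i += 1
--         elif ys[j] < xs[i]:
--             j += 1
--         else:
--             kernel += 1
--             i += 1
--             j += 1
--
--     # Cluster phase: one point per cluster with in-range hits in both strings.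
--     for cl in clusters:
--         in_range = [g for g in cl if ngram_range_min <= len(g) <= ngram_range_max]
--         if any(string1.count(g) > 0 for g in in_range) and \
--            any(string2.count(g) > 0 for g in in_range):
--             kernel += 1
--     return kernel
-- ===== Notes on version B (the rewrite author's own statement) =====
-- stated objective: alternative
-- what changed: Replaces A's interleaved dict-building/pop-counting of shared n-grams by a sort-then-merge algorithm: both distinct-gram collections are sorted and the shared count is obtained by a two-pointer merge over the two sorted lists, and the per-cluster index-keyed count-sum dicts become a direct any/any test per cluster.
import Mathlib
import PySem

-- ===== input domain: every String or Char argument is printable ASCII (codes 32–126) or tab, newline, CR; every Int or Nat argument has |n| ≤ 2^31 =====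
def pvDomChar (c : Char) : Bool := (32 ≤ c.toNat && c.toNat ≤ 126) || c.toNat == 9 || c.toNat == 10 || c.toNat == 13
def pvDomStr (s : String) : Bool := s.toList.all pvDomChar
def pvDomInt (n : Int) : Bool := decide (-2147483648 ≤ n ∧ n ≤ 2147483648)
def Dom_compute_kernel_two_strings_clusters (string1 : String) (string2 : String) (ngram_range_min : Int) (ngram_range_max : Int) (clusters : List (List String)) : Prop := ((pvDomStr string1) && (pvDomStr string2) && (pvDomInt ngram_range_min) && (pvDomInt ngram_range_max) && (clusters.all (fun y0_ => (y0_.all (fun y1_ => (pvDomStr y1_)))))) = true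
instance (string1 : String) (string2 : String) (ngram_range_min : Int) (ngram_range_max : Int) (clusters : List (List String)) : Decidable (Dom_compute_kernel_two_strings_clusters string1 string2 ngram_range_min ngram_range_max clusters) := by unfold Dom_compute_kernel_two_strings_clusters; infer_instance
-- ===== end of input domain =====

-- B replaces A's interleaved dict-building/pop-counting of shared n-grams by sorting the two
-- distinct-gram collections and counting the shared ones with a two-pointer merge, and replaces
-- the per-cluster count-sum dicts by a direct any/any test per cluster (objective: alternative).

-- ===== PORT A =====

-- 'found = False; for cluster in clusters: if ngram in cluster: found = True; break'
def pvFoundA (clusters : List (List String)) (g : List Char) : Bool :=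
  clusters.any (fun cl => cl.any (fun w => w.toList == g))

-- body of A's first loop for one ngram g (update ngrams_in_clusters cache, then ngrams)
def pvStep1 (clusters : List (List String))
    (st : PySem.Dict (List Char) Int × PySem.Dict (List Char) Bool) (g : List Char) :
    PySem.Dict (List Char) Int × PySem.Dict (List Char) Bool :=
  let nic := if st.2.contains g then st.2 else st.2.insert g (pvFoundA clusters g)
  if nic.getD g true = false then
    ((if st.1.contains g then st.1.insert g (st.1.getD g 0 + 1) else st.1.insert g 1), nic)
  else (st.1, nic)

-- body of A's second loop for one ngram g ('if ngram in ngrams: kernel += 1; ngrams.pop(ngram)')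
def pvStep2 (st : Int × PySem.Dict (List Char) Int) (g : List Char) :
    Int × PySem.Dict (List Char) Int :=
  if st.2.contains g then (st.1 + 1, st.2.erase g) else st

-- body of A's count-accumulation loop for one enumerate entry (cl_index, cl)
def pvAccStep (string1 string2 : String) (nmin nmax : Int)
    (dd : PySem.Dict Int Int × PySem.Dict Int Int) (p : Int × List String) :
    PySem.Dict Int Int × PySem.Dict Int Int :=
  p.2.foldl (fun dd w =>
    if nmin ≤ PySem.Str.len w ∧ PySem.Str.len w ≤ nmax then
      (dd.1.insert p.1 (dd.1.getD p.1 0 + (PySem.Str.count string1 w : Int)),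
       dd.2.insert p.1 (dd.2.getD p.1 0 + (PySem.Str.count string2 w : Int)))
    else dd) dd

def compute_kernel_two_strings_clusters (string1 : String) (string2 : String) (ngram_range_min : Int) (ngram_range_max : Int) (clusters : List (List String)) : Int :=
  let cs1 := string1.toList
  let cs2 := string2.toList
  -- phase 1: build ngrams / ngrams_in_clusters over string1
  let st1 :=
    (PySem.List.enumerate cs1).foldl (fun st p =>
      (PySem.List.pyRange ngram_range_min (ngram_range_max + 1)).foldl (fun st d =>
        if p.1 + d ≤ (cs1.length : Int) then
          pvStep1 clusters st (PySem.List.slice cs1 (some p.1) (some (p.1 + d)))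
        else st) st)
      (PySem.Dict.empty, PySem.Dict.empty)
  -- phase 2: scan string2, popping shared ngrams
  let st2 :=
    (PySem.List.enumerate cs2).foldl (fun st p =>
      (PySem.List.pyRange ngram_range_min (ngram_range_max + 1)).foldl (fun st d =>
        if p.1 + d ≤ (cs2.length : Int) then
          pvStep2 st (PySem.List.slice cs2 (some p.1) (some (p.1 + d)))
        else st) st)
      ((0 : Int), st1.1)
  -- phase 3: d1/d2 initialisation and per-cluster count sums
  let dd0 :=
    (PySem.List.enumerate clusters).foldl
      (fun dd p => (dd.1.insert p.1 (0 : Int), dd.2.insert p.1 (0 : Int)))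
      ((PySem.Dict.empty : PySem.Dict Int Int), (PySem.Dict.empty : PySem.Dict Int Int))
  let dd1 :=
    (PySem.List.enumerate clusters).foldl
      (pvAccStep string1 string2 ngram_range_min ngram_range_max) dd0
  -- final loop: kernel += 1 unless d1[cl] * d2[cl] == 0
  (PySem.List.enumerate clusters).foldl (fun k p =>
    if dd1.1.getD p.1 0 * dd1.2.getD p.1 0 = 0 then k else k + 1) st2.1

-- ===== PORT B =====

-- the gram generator {s[i:i+d] for i in range(len(s)) for d in ds if i+d <= len(s)} (before set())
def pvGramsB (cs : List Char) (nmin nmax : Int) : List (List Char) :=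
  (PySem.List.pyRange 0 (PySem.List.len cs)).flatMap (fun i =>
    ((PySem.List.pyRange nmin (nmax + 1)).filter
        (fun d => decide (i + d ≤ (cs.length : Int)))).map
      (fun d => PySem.List.slice cs (some i) (some (i + d))))

-- the two-pointer merge loop over the two sorted lists ('while i < len(xs) and j < len(ys): …')
def pvMergeCount : List (List Char) → List (List Char) → Int
  | [], _ => 0
  | _ :: _, [] => 0
  | x :: xs, y :: ys =>
    if x < y then pvMergeCount xs (y :: ys)
    else if y < x then pvMergeCount (x :: xs) ys
    else 1 + pvMergeCount xs ys
termination_by a b => a.length + b.length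

def compute_kernel_two_strings_clusters_alt (string1 : String) (string2 : String) (ngram_range_min : Int) (ngram_range_max : Int) (clusters : List (List String)) : Int :=
  let cs1 := string1.toList
  let cs2 := string2.toList
  let cluster_union : PySem.Set (List Char) :=
    clusters.foldl (fun s cl => PySem.Set.update s (cl.map String.toList)) PySem.Set.empty
  let xs : List (List Char) :=
    PySem.List.sorted
      ((PySem.Set.ofList (pvGramsB cs1 ngram_range_min ngram_range_max)).filter
        (fun g => !(PySem.Set.contains cluster_union g)))
      (fun x => x) false
  let ys : List (List Char) :=
    PySem.List.sorted (PySem.Set.ofList (pvGramsB cs2 ngram_range_min ngram_range_max))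
      (fun x => x) false
  let kernel : Int := pvMergeCount xs ys
  clusters.foldl (fun k cl =>
    let inr := cl.filter (fun w =>
      decide (ngram_range_min ≤ PySem.Str.len w ∧ PySem.Str.len w ≤ ngram_range_max))
    if inr.any (fun w => decide (0 < PySem.Str.count string1 w)) &&
       inr.any (fun w => decide (0 < PySem.Str.count string2 w)) then k + 1 else k) kernel

-- ===== PRECONDITION & SPEC =====
def Spec_compute_kernel_two_strings_clusters (string1 : String) (string2 : String) (ngram_range_min : Int) (ngram_range_max : Int) (clusters : List (List String)) (out : Int) : Prop := out = compute_kernel_two_strings_clusters_alt string1 string2 ngram_range_min ngram_range_max clusters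
instance (string1 : String) (string2 : String) (ngram_range_min : Int) (ngram_range_max : Int) (clusters : List (List String)) (out : Int) : Decidable (Spec_compute_kernel_two_strings_clusters string1 string2 ngram_range_min ngram_range_max clusters out) := by unfold Spec_compute_kernel_two_strings_clusters; infer_instance

-- ===== CLAIM (what is proved, stated in full; the proofs are below) =====
def Claim_equal_compute_kernel_two_strings_clusters : Prop := ∀ (string1 : String) (string2 : String) (ngram_range_min : Int) (ngram_range_max : Int) (clusters : List (List String)), Dom_compute_kernel_two_strings_clusters string1 string2 ngram_range_min ngram_range_max clusters → Spec_compute_kernel_two_strings_clusters string1 string2 ngram_range_min ngram_range_max clusters (compute_kernel_two_strings_clusters string1 string2 ngram_range_min ngram_range_max clusters)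

-- ===== LEMMAS AND PROOFS =====

-- A's nested char/d loops process exactly the grams list pvGramsB, in order
theorem pv_flatten {σ : Type} (cs : List Char) (nmin nmax : Int) (f : σ → List Char → σ)
    (init : σ) :
    (PySem.List.enumerate cs).foldl (fun st p =>
      (PySem.List.pyRange nmin (nmax + 1)).foldl (fun st d =>
        if p.1 + d ≤ (cs.length : Int) then
          f st (PySem.List.slice cs (some p.1) (some (p.1 + d)))
        else st) st) init
    = (pvGramsB cs nmin nmax).foldl f init := by
  rw [PySem.List.enumerate_eq_map_pyRange cs ' ', List.foldl_map]
  rw [pvGramsB, List.foldl_flatMap]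
  apply PySem.List.foldl_congr_mem
  intro acc i _
  rw [List.foldl_map, ← PySem.List.foldl_ite_eq_foldl_filter
    (p := fun d => i + d ≤ (cs.length : Int))
    (f := fun st d => f st (PySem.List.slice cs (some i) (some (i + d))))]

-- uniform-insert form of A's ngrams update
def pvStepN (clusters : List (List String)) (n : PySem.Dict (List Char) Int) (g : List Char) :
    PySem.Dict (List Char) Int :=
  if pvFoundA clusters g = false then n.insert g (n.getD g 0 + 1) else n

theorem pv_phase1_fst (clusters : List (List String)) (l : List (List Char)) :
    ∀ (n : PySem.Dict (List Char) Int) (c : PySem.Dict (List Char) Bool),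
    (∀ g b, c.get? g = some b → b = pvFoundA clusters g) →
    (l.foldl (pvStep1 clusters) (n, c)).1 = l.foldl (pvStepN clusters) n := by
  induction l with
  | nil => intro n c _; rfl
  | cons g t ih =>
    intro n c hinv
    rw [List.foldl_cons, List.foldl_cons]
    have hnic : ∃ nic : PySem.Dict (List Char) Bool,
        (if c.contains g then c else c.insert g (pvFoundA clusters g)) = nic ∧
        nic.getD g true = pvFoundA clusters g ∧
        (∀ g' b, nic.get? g' = some b → b = pvFoundA clusters g') := by
      by_cases hc : c.contains g = true
      · refine ⟨c, by simp [hc], ?_, hinv⟩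
        rw [PySem.Dict.contains_eq_isSome_get?] at hc
        rcases Option.isSome_iff_exists.1 hc with ⟨b, hb⟩
        rw [PySem.Dict.getD_eq_get?_getD, hb, Option.getD_some]
        exact hinv g b hb
      · refine ⟨c.insert g (pvFoundA clusters g), by simp [hc], ?_, ?_⟩
        · rw [PySem.Dict.getD_insert_self]
        · intro g' b hb
          rw [PySem.Dict.get?_insert] at hb
          split at hb
          · rename_i h; cases hb; subst h; rfl
          · exact hinv g' b hb
    rcases hnic with ⟨nic, hdef, hval, hinv'⟩
    have hstep : pvStep1 clusters (n, c) g = (pvStepN clusters n g, nic) := by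
      show (let nic' := if c.contains g then c else c.insert g (pvFoundA clusters g);
        if nic'.getD g true = false then
          ((if n.contains g then n.insert g (n.getD g 0 + 1) else n.insert g 1), nic')
        else (n, nic')) = (pvStepN clusters n g, nic)
      simp only [hdef, hval, pvStepN]
      by_cases hf : pvFoundA clusters g = false
      · simp only [hf, if_true]
        by_cases hc : n.contains g = true
        · simp [hc]
        · simp only [Bool.not_eq_true] at hc
          simp [hc, PySem.Dict.getD_of_not_contains n 0 hc]
      · simp [hf]
    rw [hstep]
    exact ih (pvStepN clusters n g) nic hinv'

theorem pv_keys_erase (d : PySem.Dict (List Char) Int) (g : List Char) :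
    (d.erase g).keys = d.keys.filter (fun x => !(x == g)) := by
  simp [PySem.Dict.erase, PySem.Dict.keys, List.filter_map, Function.comp_def]

-- cardinality step for the pop loop
theorem pv_filter_len_cons {g : List Char} {keys : List (List Char)} (rest : List (List Char))
    (hnd : keys.Nodup) (hg : g ∈ keys) :
    (keys.filter (fun x => decide (x ∈ g :: rest))).length
      = 1 + ((keys.filter (fun x => !(x == g))).filter (fun x => decide (x ∈ rest))).length := by
  have hperm : keys.Perm (g :: keys.erase g) := List.perm_cons_erase hg
  have he : keys.filter (fun x => !(x == g)) = keys.erase g := by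
    rw [List.Nodup.erase_eq_filter hnd]
    apply List.filter_congr
    intro y _
    simp [bne]
  rw [he, (hperm.filter (fun x => decide (x ∈ g :: rest))).length_eq, List.filter_cons]
  have h2 : (keys.erase g).filter (fun x => decide (x ∈ g :: rest))
      = (keys.erase g).filter (fun x => decide (x ∈ rest)) := by
    apply List.filter_congr
    intro y hy
    have hne : y ≠ g := ((hnd.mem_erase_iff).1 hy).1
    simp [List.mem_cons, hne]
  rw [if_pos (by simp), List.length_cons, h2]
  omega

theorem pv_phase2_count (l : List (List Char)) :
    ∀ (k : Int) (n : PySem.Dict (List Char) Int), n.keys.Nodup →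
    (l.foldl pvStep2 (k, n)).1
      = k + ((n.keys.filter (fun x => decide (x ∈ l))).length : Int) := by
  induction l with
  | nil => intro k n _; simp
  | cons g rest ih =>
    intro k n hnd
    rw [List.foldl_cons]
    by_cases hc : n.contains g = true
    · have hstep : pvStep2 (k, n) g = (k + 1, n.erase g) := by simp [pvStep2, hc]
      rw [hstep, ih (k + 1) (n.erase g) (by rw [pv_keys_erase]; exact hnd.filter _)]
      rw [pv_keys_erase]
      have hg : g ∈ n.keys := (PySem.Dict.contains_iff_mem_keys n g).1 hc
      rw [pv_filter_len_cons rest hnd hg]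
      push_cast
      ring
    · have hstep : pvStep2 (k, n) g = (k, n) := by simp [pvStep2]; simp at hc; exact hc
      rw [hstep, ih k n hnd]
      have hgk : g ∉ n.keys := fun h => hc ((PySem.Dict.contains_iff_mem_keys n g).2 h)
      have : n.keys.filter (fun x => decide (x ∈ g :: rest))
           = n.keys.filter (fun x => decide (x ∈ rest)) := by
        apply List.filter_congr
        intro y hy
        have : y ≠ g := fun h => hgk (h ▸ hy)
        simp [List.mem_cons, this]
      rw [this]

-- membership/nodup facts about the first-phase dict keys
theorem pv_keysN (clusters : List (List String)) (l : List (List Char)) :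
    (l.foldl (pvStepN clusters) PySem.Dict.empty).keys
      = PySem.Set.ofList (l.filter (fun g => decide (pvFoundA clusters g = false))) := by
  have hsn : pvStepN clusters = fun n g =>
      if pvFoundA clusters g = false then n.insert g (n.getD g 0 + 1) else n := rfl
  rw [hsn]
  have hflt := PySem.List.foldl_ite_eq_foldl_filter (fun g => pvFoundA clusters g = false)
    (fun (n : PySem.Dict (List Char) Int) g => n.insert g (n.getD g 0 + 1)) l PySem.Dict.empty
  beta_reduce at hflt
  rw [hflt]
  rw [PySem.Dict.keys_foldl_insert]
  simp [PySem.Set.ofList, PySem.Set.update, PySem.Set.empty, PySem.Dict.keys_empty]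

-- B's cluster union contains exactly the grams some cluster mentions
theorem pv_union_mem (clusters : List (List String)) (g : List Char) :
    (g ∈ clusters.foldl (fun s cl => PySem.Set.update s (cl.map String.toList)) PySem.Set.empty)
      ↔ pvFoundA clusters g = true := by
  have aux : ∀ (cls : List (List String)) (s : PySem.Set (List Char)),
      (g ∈ cls.foldl (fun s cl => PySem.Set.update s (cl.map String.toList)) s)
        ↔ g ∈ s ∨ pvFoundA cls g = true := by
    intro cls
    induction cls with
    | nil => intro s; simp [pvFoundA]
    | cons cl t ih =>
      intro s
      rw [List.foldl_cons, ih]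
      rw [PySem.Set.mem_update]
      simp only [pvFoundA, List.any_cons, List.mem_map, Bool.or_eq_true, List.any_eq_true,
        beq_iff_eq, or_assoc]
  rw [aux clusters PySem.Set.empty]
  simp [PySem.Set.empty]

-- Pairwise ≤ plus Nodup gives Pairwise <
theorem pv_pairwise_lt {l : List (List Char)}
    (h1 : l.Pairwise (· ≤ ·)) (h2 : l.Nodup) : l.Pairwise (· < ·) := by
  have := h1.and h2
  exact this.imp (fun h => lt_of_le_of_ne h.1 h.2)

-- correctness of the two-pointer merge on sorted strictly-increasing lists
theorem pv_merge_eq : ∀ (xs ys : List (List Char)),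
    xs.Pairwise (· < ·) → ys.Pairwise (· < ·) →
    pvMergeCount xs ys = ((xs.filter (fun x => decide (x ∈ ys))).length : Int)
  | [], ys, _, _ => by simp [pvMergeCount]
  | x :: xs, [], _, _ => by simp [pvMergeCount]
  | x :: xs, y :: ys, hx, hy => by
    rw [pvMergeCount]
    by_cases h1 : x < y
    · rw [if_pos h1, pv_merge_eq xs (y :: ys) hx.tail hy]
      have hnm : x ∉ y :: ys := by
        intro hm
        rcases List.mem_cons.1 hm with h | h
        · exact absurd h1 (by rw [h]; exact lt_irrefl y)
        · exact absurd (h1.trans ((List.pairwise_cons.1 hy).1 x h)) (lt_irrefl x)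
      rw [List.filter_cons, if_neg (by simpa using hnm)]
    · rw [if_neg h1]
      by_cases h2 : y < x
      · rw [if_pos h2, pv_merge_eq (x :: xs) ys hx hy.tail]
        congr 1
        apply congrArg
        apply List.filter_congr
        intro z hz
        have hyz : y < z := by
          rcases List.mem_cons.1 hz with h | h
          · rw [h]; exact h2
          · exact h2.trans ((List.pairwise_cons.1 hx).1 z h)
        have : z ≠ y := fun h => absurd (h ▸ hyz) (lt_irrefl y)
        simp [List.mem_cons, this]
      · rw [if_neg h2]
        have hxy : x = y := le_antisymm (not_lt.1 h2) (not_lt.1 h1)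
        rw [pv_merge_eq xs ys hx.tail hy.tail]
        rw [List.filter_cons, if_pos (by simp [hxy]), List.length_cons]
        have : xs.filter (fun z => decide (z ∈ y :: ys))
             = xs.filter (fun z => decide (z ∈ ys)) := by
          apply List.filter_congr
          intro z hz
          have hyz : y < z := hxy ▸ (List.pairwise_cons.1 hx).1 z hz
          have : z ≠ y := fun h => absurd (h ▸ hyz) (lt_irrefl y)
          simp [List.mem_cons, this]
        rw [this]
        push_cast
        ring
termination_by xs ys => xs.length + ys.length

-- per-cluster in-range count sum
def pvSum1 (s : String) (nmin nmax : Int) (cl : List String) : Int :=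
  (((cl.filter (fun w => decide (nmin ≤ PySem.Str.len w ∧ PySem.Str.len w ≤ nmax))).map
    (fun w => (PySem.Str.count s w : Int))).sum)

theorem pv_getD_foldl_insert_add {α : Type} (l : List α) (c : Int) (f : α → Int) :
    ∀ (d : PySem.Dict Int Int) (k : Int),
    (l.foldl (fun d w => d.insert c (d.getD c 0 + f w)) d).getD k 0
      = if k = c then d.getD c 0 + (l.map f).sum else d.getD k 0 := by
  induction l with
  | nil =>
    intro d k
    simp only [List.foldl_nil, List.map_nil, List.sum_nil, add_zero]
    split
    · rename_i h; rw [h]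
    · rfl
  | cons a t ih =>
    intro d k
    rw [List.foldl_cons, ih]
    by_cases hk : k = c
    · subst hk
      simp [PySem.Dict.getD_insert_self]
      ring
    · simp [hk, PySem.Dict.getD_insert]

theorem pv_acc_step_getD (string1 string2 : String) (nmin nmax : Int)
    (dd : PySem.Dict Int Int × PySem.Dict Int Int) (p : Int × List String) (k : Int) :
    (pvAccStep string1 string2 nmin nmax dd p).1.getD k 0
        = (if k = p.1 then dd.1.getD p.1 0 + pvSum1 string1 nmin nmax p.2 else dd.1.getD k 0)
    ∧ (pvAccStep string1 string2 nmin nmax dd p).2.getD k 0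
        = (if k = p.1 then dd.2.getD p.1 0 + pvSum1 string2 nmin nmax p.2 else dd.2.getD k 0) := by
  have hstep := PySem.List.foldl_ite_eq_foldl_filter
    (fun w => nmin ≤ PySem.Str.len w ∧ PySem.Str.len w ≤ nmax)
    (fun (dd : PySem.Dict Int Int × PySem.Dict Int Int) w =>
      (dd.1.insert p.1 (dd.1.getD p.1 0 + (PySem.Str.count string1 w : Int)),
       dd.2.insert p.1 (dd.2.getD p.1 0 + (PySem.Str.count string2 w : Int)))) p.2 dd
  beta_reduce at hstep
  unfold pvAccStep
  rw [hstep]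
  rcases dd with ⟨d1, d2⟩
  rw [PySem.List.foldl_prod_mk
    (f := fun (d : PySem.Dict Int Int) w => d.insert p.1 (d.getD p.1 0 + (PySem.Str.count string1 w : Int)))
    (g := fun (d : PySem.Dict Int Int) w => d.insert p.1 (d.getD p.1 0 + (PySem.Str.count string2 w : Int)))]
  constructor
  · rw [pv_getD_foldl_insert_add]
    simp [pvSum1]
  · rw [pv_getD_foldl_insert_add]
    simp [pvSum1]

theorem pv_acc_untouched (string1 string2 : String) (nmin nmax : Int)
    (cls : List (List String)) :
    ∀ (s : Int) (dd : PySem.Dict Int Int × PySem.Dict Int Int) (j : Int), j < s →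
    ((PySem.List.enumerate cls s).foldl (pvAccStep string1 string2 nmin nmax) dd).1.getD j 0
        = dd.1.getD j 0
    ∧ ((PySem.List.enumerate cls s).foldl (pvAccStep string1 string2 nmin nmax) dd).2.getD j 0
        = dd.2.getD j 0 := by
  induction cls with
  | nil => intro s dd j _; simp [PySem.List.enumerate]
  | cons cl t ih =>
    intro s dd j hj
    rw [PySem.List.enumerate_cons, List.foldl_cons]
    have h := ih (s + 1) (pvAccStep string1 string2 nmin nmax dd (s, cl)) j (by omega)
    have hg := pv_acc_step_getD string1 string2 nmin nmax dd (s, cl) j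
    have hne : j ≠ (s, cl).1 := by simp; omega
    simp only [if_neg hne] at hg
    rw [h.1, h.2, hg.1, hg.2]
    exact ⟨rfl, rfl⟩

theorem pv_cluster_phase (string1 string2 : String) (nmin nmax : Int)
    (cls : List (List String)) :
    ∀ (s : Int) (dd : PySem.Dict Int Int × PySem.Dict Int Int) (k : Int),
    (∀ i, s ≤ i → dd.1.getD i 0 = 0 ∧ dd.2.getD i 0 = 0) →
    (PySem.List.enumerate cls s).foldl (fun k p =>
        if ((PySem.List.enumerate cls s).foldl (pvAccStep string1 string2 nmin nmax) dd).1.getD p.1 0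
           * ((PySem.List.enumerate cls s).foldl (pvAccStep string1 string2 nmin nmax) dd).2.getD p.1 0 = 0
        then k else k + 1) k
    = cls.foldl (fun k cl =>
        if pvSum1 string1 nmin nmax cl * pvSum1 string2 nmin nmax cl = 0 then k else k + 1) k := by
  induction cls with
  | nil => intro s dd k _; simp [PySem.List.enumerate]
  | cons cl t ih =>
    intro s dd k hz
    rw [PySem.List.enumerate_cons, List.foldl_cons, List.foldl_cons, List.foldl_cons]
    set dd' := pvAccStep string1 string2 nmin nmax dd (s, cl) with hdd'
    have hu := pv_acc_untouched string1 string2 nmin nmax t (s + 1) dd' s (by omega)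
    have hg := pv_acc_step_getD string1 string2 nmin nmax dd (s, cl) s
    simp at hg
    have hz0 := hz s (le_refl s)
    have h1 : ((PySem.List.enumerate t (s + 1)).foldl (pvAccStep string1 string2 nmin nmax) dd').1.getD s 0
        = pvSum1 string1 nmin nmax cl := by
      rw [hu.1, ← hdd'] at *
      rw [hg.1, hz0.1, zero_add]
    have h2 : ((PySem.List.enumerate t (s + 1)).foldl (pvAccStep string1 string2 nmin nmax) dd').2.getD s 0
        = pvSum1 string2 nmin nmax cl := by
      rw [hu.2, hg.2, hz0.2, zero_add]
    rw [h1, h2]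
    have hz' : ∀ i, s + 1 ≤ i → dd'.1.getD i 0 = 0 ∧ dd'.2.getD i 0 = 0 := by
      intro i hi
      have hgi := pv_acc_step_getD string1 string2 nmin nmax dd (s, cl) i
      have hne : i ≠ (s, cl).1 := by simp; omega
      simp only [if_neg hne] at hgi
      have := hz i (by omega)
      exact ⟨hgi.1.trans this.1, hgi.2.trans this.2⟩
    exact ih (s + 1) dd'
      (if pvSum1 string1 nmin nmax cl * pvSum1 string2 nmin nmax cl = 0 then k else k + 1) hz'

theorem pv_init_zero (cls : List (List String)) :
    ∀ (s : Int) (dd : PySem.Dict Int Int × PySem.Dict Int Int),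
    (∀ i, dd.1.getD i 0 = 0 ∧ dd.2.getD i 0 = 0) →
    ∀ i, ((PySem.List.enumerate cls s).foldl
            (fun dd p => (dd.1.insert p.1 (0 : Int), dd.2.insert p.1 (0 : Int))) dd).1.getD i 0 = 0
       ∧ ((PySem.List.enumerate cls s).foldl
            (fun dd p => (dd.1.insert p.1 (0 : Int), dd.2.insert p.1 (0 : Int))) dd).2.getD i 0 = 0 := by
  induction cls with
  | nil => intro s dd h i; simpa [PySem.List.enumerate] using h i
  | cons cl t ih =>
    intro s dd h i
    rw [PySem.List.enumerate_cons, List.foldl_cons]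
    apply ih (s + 1)
    intro i'
    constructor
    · rw [PySem.Dict.getD_insert]
      split
      · rfl
      · exact (h i').1
    · rw [PySem.Dict.getD_insert]
      split
      · rfl
      · exact (h i').2

theorem pv_sum_zero_iff (s : String) (nmin nmax : Int) (cl : List String) :
    pvSum1 s nmin nmax cl = 0
      ↔ (cl.filter (fun w => decide (nmin ≤ PySem.Str.len w ∧ PySem.Str.len w ≤ nmax))).any
          (fun w => decide (0 < PySem.Str.count s w)) = false := by
  unfold pvSum1
  rw [show ((cl.filter (fun w => decide (nmin ≤ PySem.Str.len w ∧ PySem.Str.len w ≤ nmax))).map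
      (fun w => (PySem.Str.count s w : Int)))
    = ((cl.filter (fun w => decide (nmin ≤ PySem.Str.len w ∧ PySem.Str.len w ≤ nmax))).map
        (fun w => PySem.Str.count s w)).map (fun n : Nat => (n : Int)) by rw [List.map_map]; rfl]
  rw [← Nat.cast_list_sum]
  rw [Nat.cast_eq_zero, List.sum_eq_zero_iff]
  simp [Nat.pos_iff_ne_zero]
  aesop

-- the per-cluster conditions of A and B agree
theorem pv_cluster_cond (string1 string2 : String) (nmin nmax : Int) (cl : List String) (k : Int) :
    (if pvSum1 string1 nmin nmax cl * pvSum1 string2 nmin nmax cl = 0 then k else k + 1)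
    = (let inr := cl.filter (fun w => decide (nmin ≤ PySem.Str.len w ∧ PySem.Str.len w ≤ nmax));
       if inr.any (fun w => decide (0 < PySem.Str.count string1 w)) &&
          inr.any (fun w => decide (0 < PySem.Str.count string2 w)) then k + 1 else k) := by
  simp only []
  by_cases h : pvSum1 string1 nmin nmax cl * pvSum1 string2 nmin nmax cl = 0
  · rw [if_pos h]
    rcases mul_eq_zero.1 h with h0 | h0
    · rw [(pv_sum_zero_iff _ _ _ _).1 h0]
      simp
    · rw [(pv_sum_zero_iff _ _ _ _).1 h0]
      simp
  · rw [if_neg h]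
    have h1 : pvSum1 string1 nmin nmax cl ≠ 0 := fun h0 => h (by rw [h0, zero_mul])
    have h2 : pvSum1 string2 nmin nmax cl ≠ 0 := fun h0 => h (by rw [h0, mul_zero])
    have e1 : (cl.filter (fun w => decide (nmin ≤ PySem.Str.len w ∧ PySem.Str.len w ≤ nmax))).any
        (fun w => decide (0 < PySem.Str.count string1 w)) = true := by
      cases hb : (cl.filter (fun w => decide (nmin ≤ PySem.Str.len w ∧ PySem.Str.len w ≤ nmax))).any
        (fun w => decide (0 < PySem.Str.count string1 w))
      · exact absurd ((pv_sum_zero_iff string1 nmin nmax cl).2 hb) h1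
      · rfl
    have e2 : (cl.filter (fun w => decide (nmin ≤ PySem.Str.len w ∧ PySem.Str.len w ≤ nmax))).any
        (fun w => decide (0 < PySem.Str.count string2 w)) = true := by
      cases hb : (cl.filter (fun w => decide (nmin ≤ PySem.Str.len w ∧ PySem.Str.len w ≤ nmax))).any
        (fun w => decide (0 < PySem.Str.count string2 w))
      · exact absurd ((pv_sum_zero_iff string2 nmin nmax cl).2 hb) h2
      · rfl
    rw [e1, e2]
    simp

-- two nodup lists with the same members have equally long filtrations
theorem pv_len_filter_eq {l m : List (List Char)} (p : List Char → Bool)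
    (hl : l.Nodup) (hm : m.Nodup) (h : ∀ x, x ∈ l ↔ x ∈ m) :
    (l.filter p).length = (m.filter p).length := by
  have hperm : l.Perm m := (List.perm_ext_iff_of_nodup hl hm).2 h
  exact (hperm.filter p).length_eq

-- the port's sorted elaborates with core List.instLT; the order lemmas use the LinearOrder instances
theorem pv_sorted_inst (l : List (List Char)) :
    (@PySem.List.sorted (List Char) (List Char) List.instLT (fun a b => a.decidableLT b) l (fun x => x) false)
    = (@PySem.List.sorted (List Char) (List Char) List.instLinearOrder.toLT LinearOrder.toDecidableLT l (fun x => x) false) := by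
  congr 1

-- ===== VERDICT (by name: the statement is the Claim_ definition above) =====
set_option maxHeartbeats 2000000 in
theorem compute_kernel_two_strings_clusters_spec : Claim_equal_compute_kernel_two_strings_clusters := by
  intro s1 s2 mn mx cls _
  unfold Spec_compute_kernel_two_strings_clusters
  unfold compute_kernel_two_strings_clusters compute_kernel_two_strings_clusters_alt
  simp only [pv_flatten]
  rw [pv_phase1_fst cls (pvGramsB s1.toList mn mx) PySem.Dict.empty PySem.Dict.empty
    (by intro g b hb; rw [PySem.Dict.get?_empty] at hb; cases hb)]
  have hkeys := pv_keysN cls (pvGramsB s1.toList mn mx)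
  have hnd : ((pvGramsB s1.toList mn mx).foldl (pvStepN cls) PySem.Dict.empty).keys.Nodup := by
    rw [hkeys]; exact PySem.Set.nodup_ofList _
  rw [pv_phase2_count (pvGramsB s2.toList mn mx) 0 _ hnd]
  have hinit := pv_init_zero cls 0 (PySem.Dict.empty, PySem.Dict.empty)
    (by intro i; constructor <;> rw [PySem.Dict.getD_empty])
  rw [pv_cluster_phase s1 s2 mn mx cls 0 _ _ (fun i _ => hinit i)]
  rw [zero_add]
  have hfun : (fun (k : Int) cl => if pvSum1 s1 mn mx cl * pvSum1 s2 mn mx cl = 0 then k else k + 1)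
      = (fun (k : Int) cl =>
        if (((cl.filter (fun w => decide (mn ≤ PySem.Str.len w ∧ PySem.Str.len w ≤ mx))).any
              (fun w => decide (0 < PySem.Str.count s1 w))) &&
            ((cl.filter (fun w => decide (mn ≤ PySem.Str.len w ∧ PySem.Str.len w ≤ mx))).any
              (fun w => decide (0 < PySem.Str.count s2 w)))) = true
        then k + 1 else k) := by
    funext k cl
    simpa using pv_cluster_cond s1 s2 mn mx cl k
  rw [hfun]
  congr 1
  -- the two kernels: A's pop count vs B's sorted two-pointer merge
  simp only [pv_sorted_inst]
  set u := cls.foldl (fun s cl => PySem.Set.update s (cl.map String.toList)) PySem.Set.empty with hu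
  set lst1 := (PySem.Set.ofList (pvGramsB s1.toList mn mx)).filter
      (fun g => !(PySem.Set.contains u g)) with hlst1
  set xs := @PySem.List.sorted (List Char) (List Char) List.instLinearOrder.toLT
      LinearOrder.toDecidableLT lst1 (fun x => x) false with hxs
  set ys := @PySem.List.sorted (List Char) (List Char) List.instLinearOrder.toLT
      LinearOrder.toDecidableLT (PySem.Set.ofList (pvGramsB s2.toList mn mx)) (fun x => x) false
    with hys
  have hnd1 : lst1.Nodup := (PySem.Set.nodup_ofList _).filter _
  have hndxs : xs.Nodup :=
    ((@PySem.List.sorted_perm (List Char) (List Char) List.instLinearOrder.toLT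
        LinearOrder.toDecidableLT lst1 (fun x => x) false).nodup_iff).2 hnd1
  have hpx : xs.Pairwise (· < ·) := by
    rw [hxs]
    exact pv_pairwise_lt (PySem.List.sorted_pairwise lst1 (fun x => x)) (hxs ▸ hndxs)
  have hpy : ys.Pairwise (· < ·) := by
    rw [hys]
    exact PySem.List.sorted_ofList_pairwise_lt (pvGramsB s2.toList mn mx)
  rw [pv_merge_eq xs ys hpx hpy]
  have hmem_ys : ∀ x, x ∈ ys ↔ x ∈ pvGramsB s2.toList mn mx := by
    intro x
    rw [hys, @PySem.List.mem_sorted (List Char) (List Char) List.instLinearOrder.toLT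
      LinearOrder.toDecidableLT, PySem.Set.mem_ofList]
  have hfil : xs.filter (fun x => decide (x ∈ ys))
      = xs.filter (fun x => decide (x ∈ pvGramsB s2.toList mn mx)) := by
    apply List.filter_congr
    intro x _
    simp [hmem_ys x]
  rw [hfil]
  congr 1
  apply pv_len_filter_eq _ hnd
    hndxs
  intro x
  rw [hkeys, PySem.Set.mem_ofList, List.mem_filter]
  rw [hxs, @PySem.List.mem_sorted (List Char) (List Char) List.instLinearOrder.toLT
    LinearOrder.toDecidableLT, hlst1, List.mem_filter, PySem.Set.mem_ofList]
  have hcu : (PySem.Set.contains u x = true) ↔ pvFoundA cls x = true := by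
    rw [PySem.Set.contains_iff, hu]; exact pv_union_mem cls x
  constructor
  · rintro ⟨h1, h2⟩
    refine ⟨h1, ?_⟩
    simp only [decide_eq_true_eq] at h2
    simp only [Bool.not_eq_eq_eq_not, Bool.not_true]
    cases hc : PySem.Set.contains u x
    · rfl
    · rw [hcu.1 hc] at h2; cases h2
  · rintro ⟨h1, h2⟩
    refine ⟨h1, ?_⟩
    simp only [Bool.not_eq_eq_eq_not, Bool.not_true] at h2
    simp only [decide_eq_true_eq]
    cases hf : pvFoundA cls x
    · rfl
    · rw [hcu.2 hf] at h2; cases h2
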